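-- pv_equiv track=rewrite | github.com/Julian1804/FinancialResearch | app/services/metric_extraction_service.py | _match_metric_name
-- ===== SOURCE A (Python) =====
-- from typing import Any, Dict, List, Optional, Tuple
--
-- def _match_metric_name(label: str, aliases: Dict[str, List[str]]) -> Optional[str]:
--     label_n = (label or "").strip().lower()
--     if not label_n:
--         return None
--     for metric_name, items in aliases.items():
--         for alias in items:
--             if alias.lower() in label_n:
--                 return metric_name
--     return None
-- ===== SOURCE B (Python) =====
-- from typing import Dict, List, Optional
--
--
-- def _match_metric_name(label: str, aliases: Dict[str, List[str]]) -> Optional[str]: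
--     label_n = (label or "").strip().lower()
--     if not label_n:
--         return None
--     # Index the lowered alias patterns by length, then sweep the label once:
--     # at each position, one hash probe per distinct pattern length finds every
--     # pattern occurring there.  Finally pick the first metric (in dict order)
--     # with an occurring alias.
--     by_len: Dict[int, set] = {}
--     for items in aliases.values():
--         for alias in items:
--             p = alias.lower()
--             by_len.setdefault(len(p), set()).add(p)
--     found = set()
--     for i in range(len(label_n)):
--         for n, pats in by_len.items():
--             chunk = label_n[i:i + n]
--             if chunk in pats:
--                 found.add(chunk)
--     return next((metric_name for metric_name, items in aliases.items()
--                  if any(a.lower() in found for a in items)), None)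
-- ===== Notes on version B (the rewrite author's own statement) =====
-- stated objective: alternative
-- what changed: B indexes the lowered alias patterns in hash sets bucketed by length and sweeps the label once, probing one bucket per distinct pattern length at each position to collect all occurring patterns, then returns the first metric (in dict order) with an occurring alias; A instead runs a full substring search over the label for every alias of every metric.
import Mathlib
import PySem

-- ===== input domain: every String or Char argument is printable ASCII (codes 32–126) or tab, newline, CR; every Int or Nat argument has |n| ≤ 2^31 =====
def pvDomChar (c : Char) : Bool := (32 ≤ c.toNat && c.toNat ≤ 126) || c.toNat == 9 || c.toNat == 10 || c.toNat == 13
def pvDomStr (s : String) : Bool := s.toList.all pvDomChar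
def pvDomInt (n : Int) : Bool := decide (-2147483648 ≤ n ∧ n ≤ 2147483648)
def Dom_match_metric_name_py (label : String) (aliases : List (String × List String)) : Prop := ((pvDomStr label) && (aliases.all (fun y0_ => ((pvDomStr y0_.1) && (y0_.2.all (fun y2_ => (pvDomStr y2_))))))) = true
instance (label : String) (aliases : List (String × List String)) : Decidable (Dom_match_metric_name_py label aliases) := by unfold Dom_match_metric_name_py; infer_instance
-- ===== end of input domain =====

-- B indexes the lowered alias patterns in sets bucketed by length and sweeps the label once,
-- probing one bucket per distinct pattern length at each position, then returns the first metric
-- with an occurring alias; A runs a substring search over the label for every alias (objective: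
-- alternative algorithm). Equivalence of return values is proved on all inputs.

-- ===== PORT A =====
-- inner loop: 'for alias in items: if alias.lower() in label_n: return metric_name'
def pvAInner (labelN m : String) : List String → Option String
  | [] => none
  | a :: rest =>
      if PySem.Str.isIn (PySem.Str.lower a) labelN then some m else pvAInner labelN m rest

-- outer loop: 'for metric_name, items in aliases.items(): …'
def pvAOuter (labelN : String) : List (String × List String) → Option String
  | [] => none
  | (m, its) :: rest =>
      match pvAInner labelN m its with
      | some r => some r
      | none => pvAOuter labelN rest

def match_metric_name_py (label : String) (aliases : List (String × List String)) : Option String :=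
  let labelN := PySem.Str.lower (PySem.Str.strip label)  -- (label or "").strip().lower(); 'label or ""' = label on String
  if labelN = "" then none
  else pvAOuter labelN (PySem.Dict.ofList aliases).items

-- ===== PORT B =====
-- for items in aliases.values(): for alias in items: p = alias.lower(); by_len.setdefault(len(p), set()).add(p)
-- (setdefault-then-add on the shared set object = modify at the key with default empty set)
def pvByLen (vals : List (List String)) : PySem.Dict Int (PySem.Set String) :=
  vals.foldl (fun bl its =>
    its.foldl (fun bl a =>
      bl.modify (PySem.Str.len (PySem.Str.lower a)) PySem.Set.empty
        (fun s => s.add (PySem.Str.lower a))) bl) PySem.Dict.empty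

-- found = set(); for i in range(len(label_n)): for n, pats in by_len.items():
--   chunk = label_n[i:i+n];  if chunk in pats: found.add(chunk)
def pvFound (labelN : String) (byLen : PySem.Dict Int (PySem.Set String)) : PySem.Set String :=
  (PySem.List.pyRange 0 (PySem.Str.len labelN) 1).foldl (fun f i =>
    byLen.items.foldl (fun f pr =>
      let chunk := PySem.Str.slice labelN (some i) (some (i + pr.1))
      if pr.2.contains chunk then f.add chunk else f) f) PySem.Set.empty

-- next((metric_name for metric_name, items in aliases.items()
--       if any(a.lower() in found for a in items)), None)
def pvBPick (found : PySem.Set String) (pairs : List (String × List String)) : Option String :=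
  (pairs.find? (fun p => p.2.any (fun a => found.contains (PySem.Str.lower a)))).map Prod.fst

def match_metric_name_py_alt (label : String) (aliases : List (String × List String)) : Option String :=
  let labelN := PySem.Str.lower (PySem.Str.strip label)
  if labelN = "" then none
  else
    let d := PySem.Dict.ofList aliases
    let byLen := pvByLen d.values
    let found := pvFound labelN byLen
    pvBPick found d.items

-- ===== PRECONDITION & SPEC =====
def Spec_match_metric_name_py (label : String) (aliases : List (String × List String)) (out : Option String) : Prop := out = match_metric_name_py_alt label aliases
instance (label : String) (aliases : List (String × List String)) (out : Option String) : Decidable (Spec_match_metric_name_py label aliases out) := by unfold Spec_match_metric_name_py; infer_instance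

-- ===== CLAIM (what is proved, stated in full; the proofs are below) =====
def Claim_equal_match_metric_name_py : Prop := ∀ (label : String) (aliases : List (String × List String)), Dom_match_metric_name_py label aliases → Spec_match_metric_name_py label aliases (match_metric_name_py label aliases)

-- ===== LEMMAS AND PROOFS =====

-- membership in a fold of conditional Set.add over any list
lemma mem_foldl_add_if {α : Type} (g : α → String) (c : α → Bool) (l : List α)
    (s : PySem.Set String) (t : String) :
    t ∈ l.foldl (fun s x => if c x then s.add (g x) else s) s ↔
      t ∈ s ∨ ∃ x ∈ l, c x ∧ t = g x := by
  induction l generalizing s with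
  | nil => simp
  | cons x rest ih =>
      simp only [List.foldl_cons, ih, List.mem_cons]
      by_cases hc : c x = true
      · simp only [hc, if_true, PySem.Set.mem_add]
        constructor
        · rintro ((h | h) | ⟨x', hx', hcx', rfl⟩)
          · exact Or.inl h
          · exact Or.inr ⟨x, Or.inl rfl, hc, h⟩
          · exact Or.inr ⟨x', Or.inr hx', hcx', rfl⟩
        · rintro (h | ⟨x', (rfl | hx'), hcx', rfl⟩)
          · exact Or.inl (Or.inl h)
          · exact Or.inl (Or.inr rfl)
          · exact Or.inr ⟨x', hx', hcx', rfl⟩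
      · simp only [hc]
        constructor
        · rintro (h | ⟨x', hx', hcx', rfl⟩)
          · exact Or.inl h
          · exact Or.inr ⟨x', Or.inr hx', hcx', rfl⟩
        · rintro (h | ⟨x', (rfl | hx'), hcx', rfl⟩)
          · exact Or.inl h
          · exact absurd hcx' (by simpa using hc)
          · exact Or.inr ⟨x', hx', hcx', rfl⟩

-- membership in the found-set built by the label sweep
lemma mem_found (labelN : String) (byLen : PySem.Dict Int (PySem.Set String)) (t : String) :
    t ∈ pvFound labelN byLen ↔
      ∃ i, (0 ≤ i ∧ i < PySem.Str.len labelN) ∧ ∃ pr ∈ byLen.items,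
        pr.2.contains (PySem.Str.slice labelN (some i) (some (i + pr.1))) = true ∧
        t = PySem.Str.slice labelN (some i) (some (i + pr.1)) := by
  unfold pvFound
  have main : ∀ (is : List Int) (s0 : PySem.Set String),
      t ∈ is.foldl (fun f i =>
            byLen.items.foldl (fun f pr =>
              let chunk := PySem.Str.slice labelN (some i) (some (i + pr.1))
              if pr.2.contains chunk then f.add chunk else f) f) s0 ↔
        t ∈ s0 ∨ ∃ i ∈ is, ∃ pr ∈ byLen.items,
          pr.2.contains (PySem.Str.slice labelN (some i) (some (i + pr.1))) = true ∧
          t = PySem.Str.slice labelN (some i) (some (i + pr.1)) := by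
    intro is
    induction is with
    | nil => simp
    | cons i rest ih =>
        intro s0
        simp only [List.foldl_cons, ih,
          mem_foldl_add_if (fun pr : Int × PySem.Set String =>
              PySem.Str.slice labelN (some i) (some (i + pr.1)))
            (fun pr => pr.2.contains (PySem.Str.slice labelN (some i) (some (i + pr.1)))),
          List.mem_cons]
        constructor
        · rintro ((h | h) | ⟨i', hi', h⟩)
          · exact Or.inl h
          · obtain ⟨pr, hpr, hc, rfl⟩ := h
            exact Or.inr ⟨i, Or.inl rfl, pr, hpr, hc, rfl⟩
          · exact Or.inr ⟨i', Or.inr hi', h⟩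
        · rintro (h | ⟨i', (rfl | hi'), h⟩)
          · exact Or.inl (Or.inl h)
          · exact Or.inl (Or.inr h)
          · exact Or.inr ⟨i', hi', h⟩
  rw [main]
  simp [PySem.Set.empty, PySem.List.mem_pyRange_one]

-- the bucket fold only grows each bucket
lemma mem_getD_byLen_step (bl : PySem.Dict Int (PySem.Set String)) (a : String)
    (k : Int) (q : String) (h : q ∈ bl.getD k PySem.Set.empty) :
    q ∈ ((bl.modify (PySem.Str.len (PySem.Str.lower a)) PySem.Set.empty
          (fun s => s.add (PySem.Str.lower a))).getD k PySem.Set.empty) := by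
  rw [PySem.Dict.getD_modify]
  split_ifs with hk
  · subst hk; exact (PySem.Set.mem_add _ _ _).mpr (Or.inl h)
  · exact h

lemma mem_getD_byLen_fold_mono (l : List String) (bl : PySem.Dict Int (PySem.Set String))
    (k : Int) (q : String) (h : q ∈ bl.getD k PySem.Set.empty) :
    q ∈ ((l.foldl (fun bl a =>
        bl.modify (PySem.Str.len (PySem.Str.lower a)) PySem.Set.empty
          (fun s => s.add (PySem.Str.lower a))) bl).getD k PySem.Set.empty) := by
  induction l generalizing bl with
  | nil => exact h
  | cons a rest ih => exact ih _ (mem_getD_byLen_step bl a k q h)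

-- each lowered alias lands in the bucket of its own length
lemma mem_getD_byLen_fold_self (l : List String) (bl : PySem.Dict Int (PySem.Set String))
    (a : String) (ha : a ∈ l) :
    PySem.Str.lower a ∈ ((l.foldl (fun bl a =>
        bl.modify (PySem.Str.len (PySem.Str.lower a)) PySem.Set.empty
          (fun s => s.add (PySem.Str.lower a))) bl).getD
        (PySem.Str.len (PySem.Str.lower a)) PySem.Set.empty) := by
  induction l generalizing bl with
  | nil => cases ha
  | cons x rest ih =>
      rcases List.mem_cons.mp ha with rfl | ha'
      · refine mem_getD_byLen_fold_mono rest _ _ _ ?_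
        rw [PySem.Dict.getD_modify_self]
        exact (PySem.Set.mem_add _ _ _).mpr (Or.inr rfl)
      · exact ih _ ha'

lemma mem_getD_pvByLen (vals : List (List String)) (its : List String) (a : String)
    (hits : its ∈ vals) (ha : a ∈ its) :
    PySem.Str.lower a ∈ ((pvByLen vals).getD (PySem.Str.len (PySem.Str.lower a)) PySem.Set.empty) := by
  unfold pvByLen
  have main : ∀ (vs : List (List String)) (bl : PySem.Dict Int (PySem.Set String)),
      its ∈ vs ∨ PySem.Str.lower a ∈ bl.getD (PySem.Str.len (PySem.Str.lower a)) PySem.Set.empty →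
      PySem.Str.lower a ∈ ((vs.foldl (fun bl its =>
        its.foldl (fun bl a =>
          bl.modify (PySem.Str.len (PySem.Str.lower a)) PySem.Set.empty
            (fun s => s.add (PySem.Str.lower a))) bl) bl).getD
        (PySem.Str.len (PySem.Str.lower a)) PySem.Set.empty) := by
    intro vs
    induction vs with
    | nil =>
        rintro bl (h | h)
        · cases h
        · exact h
    | cons v rest ih =>
        rintro bl (h | h)
        · rcases List.mem_cons.mp h with rfl | h'
          · exact ih _ (Or.inr (mem_getD_byLen_fold_self its bl a ha))
          · exact ih _ (Or.inl h')
        · exact ih _ (Or.inr (mem_getD_byLen_fold_mono v bl _ _ h))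
  exact main vals PySem.Dict.empty (Or.inl hits)

-- a nonempty bucket value is an items pair of the dict
lemma bucket_of_mem_getD (d : PySem.Dict Int (PySem.Set String)) (k : Int) (q : String)
    (h : q ∈ d.getD k PySem.Set.empty) :
    ∃ pats, (k, pats) ∈ d.items ∧ q ∈ pats := by
  rw [PySem.Dict.getD_eq_get?_getD] at h
  cases hg : d.get? k with
  | none => rw [hg] at h; cases h
  | some pats =>
      rw [hg] at h
      exact ⟨pats, PySem.Dict.mem_items_of_get?_eq_some _ hg, h⟩

-- every key of the bucket dict is a pattern length, hence nonnegative
lemma pvByLen_keys_nonneg (vals : List (List String)) (k : Int) (hk : k ∈ (pvByLen vals).keys) :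
    0 ≤ k := by
  unfold pvByLen at hk
  have main : ∀ (vs : List (List String)) (bl : PySem.Dict Int (PySem.Set String)),
      (∀ k' ∈ bl.keys, 0 ≤ k') →
      ∀ k' ∈ (vs.foldl (fun bl its =>
        its.foldl (fun bl a =>
          bl.modify (PySem.Str.len (PySem.Str.lower a)) PySem.Set.empty
            (fun s => s.add (PySem.Str.lower a))) bl) bl).keys, 0 ≤ k' := by
    intro vs
    induction vs with
    | nil => intro bl h; exact h
    | cons v rest ih =>
        intro bl h
        refine ih _ ?_
        rw [PySem.Dict.keys_foldl_modify_key]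
        intro k' hk'
        rcases (PySem.Set.mem_update _ _ _).mp hk' with h' | h'
        · exact h _ h'
        · obtain ⟨a, _, rfl⟩ := List.mem_map.mp h'
          rw [PySem.Str.len_eq]; positivity
  exact main vals PySem.Dict.empty (by simp [PySem.Dict.keys_empty]) k hk

-- the found-set lookup computes Python's 'in' test for every pattern stored in its length bucket
lemma contains_found (labelN p : String) (byLen : PySem.Dict Int (PySem.Set String))
    (hne : labelN ≠ "")
    (hkeys : ∀ k ∈ byLen.keys, 0 ≤ k)
    (hbucket : p ∈ byLen.getD (PySem.Str.len p) PySem.Set.empty) :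
    (pvFound labelN byLen).contains p = PySem.Str.isIn p labelN := by
  have hL : 0 < labelN.toList.length := by
    rcases Nat.eq_zero_or_pos labelN.toList.length with h | h
    · exact absurd (String.toList_eq_nil_iff.mp (List.length_eq_zero_iff.mp h)) hne
    · exact h
  obtain ⟨pats, hpair, hppats⟩ := bucket_of_mem_getD byLen _ p hbucket
  rw [Bool.eq_iff_iff, PySem.Set.contains_iff, PySem.Str.isIn_iff_infix, mem_found]
  constructor
  · rintro ⟨i, ⟨hi0, hiL⟩, pr, hpr, hc, rfl⟩
    have hn0 : 0 ≤ pr.1 := hkeys pr.1 (PySem.Dict.mem_keys_of_mem_items _ hpr)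
    rw [PySem.Str.toList_slice, PySem.Chars.slice_eq_listSlice,
        PySem.List.slice_toNat _ hi0 (by omega)]
    exact ((List.take_prefix _ _).isInfix).trans ((List.drop_suffix _ _).isInfix)
  · intro hinf
    obtain ⟨pre, suf, hsplit⟩ := hinf
    by_cases hnil : p.toList = []
    · -- empty pattern: found at position 0 via its (length-0) bucket
      have hlen0 : PySem.Str.len p = 0 := by
        rw [PySem.Str.len_eq, hnil]; rfl
      have hslice : PySem.Str.slice labelN (some 0) (some (0 + (0 : Int))) = p := by
        rw [← String.toList_inj, PySem.Str.toList_slice, PySem.Chars.slice_eq_listSlice, hnil]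
        rw [show ((0 : Int) + 0) = (0 : Int) by norm_num,
            PySem.List.slice_toNat _ le_rfl le_rfl]
        simp
      refine ⟨0, ⟨le_refl _, by rw [PySem.Str.len_eq]; exact_mod_cast hL⟩,
        (PySem.Str.len p, pats), hpair, ?_, ?_⟩
      · rw [show ((PySem.Str.len p, pats) : Int × PySem.Set String).1 = (0 : Int) from hlen0]
        rw [hslice]
        exact (PySem.Set.contains_iff _ _).mpr hppats
      · rw [show ((PySem.Str.len p, pats) : Int × PySem.Set String).1 = (0 : Int) from hlen0]
        exact hslice.symm
    · -- nonempty pattern found at offset pre.length via its length bucket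
      have htlen : 0 < p.toList.length := List.length_pos_iff.mpr hnil
      have hlen : pre.length + p.toList.length + suf.length = labelN.toList.length := by
        have h := congrArg List.length hsplit
        rw [List.length_append, List.length_append] at h
        exact h
      have hslice : PySem.Str.slice labelN (some (pre.length : Int))
          (some ((pre.length : Int) + PySem.Str.len p)) = p := by
        rw [← String.toList_inj, PySem.Str.toList_slice, PySem.Chars.slice_eq_listSlice,
            PySem.Str.len_eq, PySem.List.slice_natCast_add, ← hsplit, List.append_assoc,
            List.drop_left, List.take_left]
      refine ⟨(pre.length : Int), ⟨by positivity, ?_⟩, (PySem.Str.len p, pats), hpair, ?_, ?_⟩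
      · rw [PySem.Str.len_eq]; exact_mod_cast (by omega : pre.length < labelN.toList.length)
      · rw [show ((PySem.Str.len p, pats) : Int × PySem.Set String).1 = PySem.Str.len p from rfl,
            hslice]
        exact (PySem.Set.contains_iff _ _).mpr hppats
      · exact hslice.symm

-- A's inner loop is an 'any' test over the aliases of one metric
lemma inner_eq_any (labelN m : String) (its : List String) :
    pvAInner labelN m its =
      if its.any (fun a => PySem.Str.isIn (PySem.Str.lower a) labelN) then some m else none := by
  induction its with
  | nil => rfl
  | cons a rest ih =>
      simp only [pvAInner, ih, List.any_cons]
      by_cases hc : PySem.Str.isIn (PySem.Str.lower a) labelN = true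
      · simp only [hc, Bool.true_or, reduceIte]
      · simp only [eq_false_of_ne_true hc, Bool.false_or, Bool.false_eq_true, if_false]

-- any-congruence under a pointwise agreement on the list's members
lemma any_congr_mem {α : Type} (l : List α) (p q : α → Bool) (h : ∀ a ∈ l, p a = q a) :
    l.any p = l.any q := by
  induction l with
  | nil => rfl
  | cons a t ih =>
      rw [List.any_cons, List.any_cons, h a List.mem_cons_self,
        ih (fun b hb => h b (List.mem_cons_of_mem _ hb))]

-- B's pick loop computes A's early-return scan when the per-alias tests agree
lemma pick_congr (labelN : String) (found : PySem.Set String) (pairs : List (String × List String))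
    (h : ∀ p ∈ pairs, ∀ a ∈ p.2,
      found.contains (PySem.Str.lower a) = PySem.Str.isIn (PySem.Str.lower a) labelN) :
    pvBPick found pairs = pvAOuter labelN pairs := by
  induction pairs with
  | nil => rfl
  | cons p rest ih =>
      obtain ⟨m, its⟩ := p
      have hany : (its.any (fun a => found.contains (PySem.Str.lower a)))
          = its.any (fun a => PySem.Str.isIn (PySem.Str.lower a) labelN) :=
        any_congr_mem _ _ _ (fun a ha => h (m, its) List.mem_cons_self a ha)
      by_cases hc : (its.any fun a => PySem.Str.isIn (PySem.Str.lower a) labelN) = true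
      · rw [pvBPick, List.find?_cons_of_pos (p := fun q : String × List String => q.2.any (fun a => found.contains (PySem.Str.lower a))) (by simp only [hany]; exact hc)]
        simp only [pvAOuter, inner_eq_any, hc, if_true, Option.map_some]
      · rw [pvBPick, List.find?_cons_of_neg (p := fun q : String × List String => q.2.any (fun a => found.contains (PySem.Str.lower a))) (by simp only [hany]; exact hc)]
        rw [← pvBPick, ih (fun p' hp' => h p' (List.mem_cons_of_mem _ hp'))]
        simp only [pvAOuter, inner_eq_any, eq_false_of_ne_true hc, Bool.false_eq_true, if_false]

-- ===== VERDICT (by name: the statement is the Claim_ definition above) =====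
theorem match_metric_name_py_spec : Claim_equal_match_metric_name_py := by
  intro label aliases _
  unfold Spec_match_metric_name_py match_metric_name_py match_metric_name_py_alt
  by_cases hne : PySem.Str.lower (PySem.Str.strip label) = ""
  · simp [hne]
  · simp only [hne, ite_false]
    refine (pick_congr _ _ _ (fun p hp a ha => ?_)).symm
    have hlow : PySem.Str.len (PySem.Str.lower a) = PySem.Str.len a := by
      rw [PySem.Str.len_eq, PySem.Str.len_eq, PySem.Str.toList_lower, PySem.Chars.lower,
        List.length_map]
    refine contains_found _ _ _ hne (pvByLen_keys_nonneg _) ?_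
    exact mem_getD_pvByLen _ p.2 a
      (by exact List.mem_map.mpr ⟨p, hp, rfl⟩) ha
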